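-- pv_equiv track=rewrite | github.com/ITDQuangI/Ptu2Excel | PtuHandle/strvar.py | replace_in_bracket
-- ===== SOURCE A (Python) =====
-- def replace_in_bracket(str_in, left, right, replace, forward=True):
--     count, new_str = 0, ''
--     for index in range(len(str_in)):
--         if str_in[index] == left:
--             count += 1
--         elif str_in[index] == right:
--             count -= 1
--         if forward is True:
--             new_str += '$' if str_in[index] == replace and count != 0   \
--             else str_in[index]
--         else:
--             new_str += replace if str_in[index] == '$' and count != 0   \
--             else str_in[index]
--     return new_str
-- ===== SOURCE B (Python) =====
-- def replace_in_bracket(str_in, left, right, replace, forward=True):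
--     # pass 1: depth after applying the bracket update at each index
--     depth = []
--     count = 0
--     for ch in str_in:
--         if ch == left:
--             count += 1
--         elif ch == right:
--             count -= 1
--         depth.append(count)
--     # pass 2: map (char, depth) pairs to output pieces and join
--     if forward is True:
--         return ''.join('$' if ch == replace and d != 0 else ch
--                        for ch, d in zip(str_in, depth))
--     return ''.join(replace if ch == '$' and d != 0 else ch
--                    for ch, d in zip(str_in, depth))
-- ===== Notes on version B (the rewrite author's own statement) =====
-- stated objective: alternative
-- what changed: Single stateful loop that mutates a count and concatenates onto a growing string is replaced by two passes: a scan that builds a depth table, then a stateless zip/join mapping pass.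
import Mathlib
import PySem

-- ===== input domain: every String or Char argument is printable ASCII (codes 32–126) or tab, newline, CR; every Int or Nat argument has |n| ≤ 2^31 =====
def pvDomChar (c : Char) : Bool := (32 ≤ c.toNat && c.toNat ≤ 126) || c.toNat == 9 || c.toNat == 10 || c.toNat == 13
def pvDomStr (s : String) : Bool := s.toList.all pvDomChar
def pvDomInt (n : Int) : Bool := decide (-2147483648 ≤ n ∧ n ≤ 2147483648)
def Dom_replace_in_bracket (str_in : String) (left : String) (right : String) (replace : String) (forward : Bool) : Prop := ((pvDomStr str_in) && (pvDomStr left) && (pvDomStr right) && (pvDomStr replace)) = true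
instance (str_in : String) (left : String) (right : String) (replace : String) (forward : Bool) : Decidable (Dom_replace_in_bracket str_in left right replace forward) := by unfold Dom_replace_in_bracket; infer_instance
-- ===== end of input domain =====

-- B replaces A's single stateful accumulate-as-you-go loop by two passes (a depth table, then a zip/map/join); alternative decomposition, same cost.


-- ===== PORT A =====
-- Python compares the single character str_in[index] (a 1-char string) with the
-- strings left/right/replace; `[c] = s.toList` is exactly that comparison.
def pvStepA (left right replace : String) (forward : Bool)
    (st : Int × List Char) (c : Char) : Int × List Char :=
  let count : Int :=
    if [c] = left.toList then st.1 + 1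
    else if [c] = right.toList then st.1 - 1
    else st.1
  let piece : List Char :=
    if forward then (if [c] = replace.toList ∧ count ≠ 0 then ['$'] else [c])
    else (if c = '$' ∧ count ≠ 0 then replace.toList else [c])
  (count, st.2 ++ piece)

def replace_in_bracket (str_in : String) (left : String) (right : String) (replace : String) (forward : Bool) : String :=
  String.mk (str_in.toList.foldl (pvStepA left right replace forward) (0, [])).2

-- ===== PORT B =====
-- pass 1: depth AFTER the bracket update at each position
def pvDepths (left right : String) : List Char → Int → List Int
  | [], _ => []
  | c :: cs, count =>
    let count' : Int :=
      if [c] = left.toList then count + 1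
      else if [c] = right.toList then count - 1
      else count
    count' :: pvDepths left right cs count'

-- pass 2: stateless map over (char, depth) pairs
def pvPiece (replace : String) (forward : Bool) (p : Char × Int) : List Char :=
  if forward then (if [p.1] = replace.toList ∧ p.2 ≠ 0 then ['$'] else [p.1])
  else (if p.1 = '$' ∧ p.2 ≠ 0 then replace.toList else [p.1])

def replace_in_bracket_alt (str_in : String) (left : String) (right : String) (replace : String) (forward : Bool) : String :=
  String.mk (((str_in.toList.zip (pvDepths left right str_in.toList 0)).map
    (pvPiece replace forward)).flatten)

-- ===== PRECONDITION & SPEC =====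
def Spec_replace_in_bracket (str_in : String) (left : String) (right : String) (replace : String) (forward : Bool) (out : String) : Prop := out = replace_in_bracket_alt str_in left right replace forward
instance (str_in : String) (left : String) (right : String) (replace : String) (forward : Bool) (out : String) : Decidable (Spec_replace_in_bracket str_in left right replace forward out) := by unfold Spec_replace_in_bracket; infer_instance

-- ===== CLAIM (what is proved, stated in full; the proofs are below) =====
def Claim_equal_replace_in_bracket : Prop := ∀ (str_in : String) (left : String) (right : String) (replace : String) (forward : Bool), Dom_replace_in_bracket str_in left right replace forward → Spec_replace_in_bracket str_in left right replace forward (replace_in_bracket str_in left right replace forward)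

-- ===== LEMMAS AND PROOFS =====
lemma pv_fold_eq (left right replace : String) (forward : Bool) :
    ∀ (cs : List Char) (count : Int) (acc : List Char),
    (cs.foldl (pvStepA left right replace forward) (count, acc)).2 =
      acc ++ ((cs.zip (pvDepths left right cs count)).map (pvPiece replace forward)).flatten := by
  intro cs
  induction cs with
  | nil => intro count acc; simp [pvDepths]
  | cons c cs ih =>
    intro count acc
    simp only [List.foldl_cons, pvDepths, pvStepA, List.zip_cons_cons, List.map_cons,
      List.flatten_cons]
    rw [ih]
    simp [pvPiece, List.append_assoc]

theorem replace_in_bracket_spec : Claim_equal_replace_in_bracket := by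
  intro str_in left right replace forward _
  unfold Spec_replace_in_bracket replace_in_bracket replace_in_bracket_alt
  rw [pv_fold_eq]
  simp
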